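-- pv_equiv track=rewrite | github.com/diku-dk/futhark | rts/python/memory.py | lmad_is_tr
-- ===== SOURCE A (Python) =====
-- def lmad_is_tr(strides, shape):
--     r = len(shape)
--     for i in range(1, r):
--         n = 1
--         m = 1
--         ok = True
--         expected = 1
--         # Check strides before 'i'.
--         for j in range(i - 1, -1, -1):
--             ok = ok and strides[j] == expected
--             expected *= shape[j]
--             n *= shape[j]
--         # Check strides after 'i'.
--         for j in range(r - 1, i - 1, -1):
--             ok = ok and strides[j] == expected
--             expected *= shape[j]
--             m *= shape[j]
--         if ok:
--             return (n, m)
--     return None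
-- ===== SOURCE B (Python) =====
-- def lmad_is_tr(strides, shape):
--     # One-pass candidate search: the chain relation strides[j] == strides[j+1]*shape[j+1]
--     # must hold everywhere except possibly at the split point; find the first/last break
--     # once (O(r)), then each split candidate i is checked in O(1) via a running prefix
--     # product, instead of A's O(r) re-scan per candidate.
--     r = len(shape)
--     L = r - 1  # first index j with a broken chain relation (r-1 if none)
--     for j in range(r - 1):
--         if strides[j] != strides[j + 1] * shape[j + 1]:
--             L = j
--             break
--     R = -1  # last index j with a broken chain relation (-1 if none)
--     for j in range(r - 2, -1, -1):
--         if strides[j] != strides[j + 1] * shape[j + 1]: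
--             R = j
--             break
--     pre = 1
--     for i in range(1, r):
--         pre *= shape[i - 1]
--         if R < i <= L + 1 and strides[i - 1] == 1 and strides[r - 1] == pre:
--             m = 1
--             for j in range(i, r):
--                 m *= shape[j]
--             return (pre, m)
--     return None
-- ===== Notes on version B (the rewrite author's own statement) =====
-- stated objective: faster
-- what changed: Instead of re-scanning all strides for every candidate split i (quadratic), B locates the first and last break of the adjacency relation strides[j] == strides[j+1]*shape[j+1] in one pass and then checks each candidate split in O(1) with a running prefix product, anchored at strides[i-1]==1 and strides[r-1]==prefix product.
-- outside the precondition, e.g. on lmad_is_tr([-1, 3, 1, 8, 88], [2, 106, 0, 7, 5, -1]): A returns None, B raises IndexError; on lmad_is_tr([0, 0], [2, 2, 2]): A returns None, B raises IndexError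
import Mathlib
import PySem

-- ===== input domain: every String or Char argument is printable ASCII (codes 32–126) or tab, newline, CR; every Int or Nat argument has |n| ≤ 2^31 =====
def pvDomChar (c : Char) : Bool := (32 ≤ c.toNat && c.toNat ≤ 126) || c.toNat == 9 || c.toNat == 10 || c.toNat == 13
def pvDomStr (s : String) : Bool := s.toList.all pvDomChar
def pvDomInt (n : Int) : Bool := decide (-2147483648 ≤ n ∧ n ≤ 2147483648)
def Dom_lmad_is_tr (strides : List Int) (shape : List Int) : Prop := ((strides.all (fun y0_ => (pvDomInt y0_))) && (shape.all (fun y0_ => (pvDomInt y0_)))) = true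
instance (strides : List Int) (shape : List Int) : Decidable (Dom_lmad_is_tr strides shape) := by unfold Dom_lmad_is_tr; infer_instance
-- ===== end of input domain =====

-- B replaces A's per-candidate re-scan of all strides by a one-pass search for the first
-- and last break of the adjacency relation plus O(1) checks per candidate split
-- (objective: faster).

-- ===== PORT A =====
-- the candidate loop 'for i in range(1, r): … if ok: return (n, m)'; each body is the
-- two inner j-loops as folds over the same countdown ranges with state (n, m, ok, expected)
def lmadA_loop (strides shape : List Int) (r : Int) : List Int → Option (List Int)
  | [] => none
  | i :: rest =>
    -- for j in range(i-1, -1, -1): ok = ok and strides[j]==expected; expected *= shape[j]; n *= shape[j]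
    let st1 : Int × Int × Bool × Int :=
      (PySem.List.pyRange (i - 1) (-1) (-1)).foldl
        (fun st j =>
          (st.1 * PySem.List.pyGetD shape j 0, st.2.1,
           st.2.2.1 && (PySem.List.pyGetD strides j 0 == st.2.2.2),
           st.2.2.2 * PySem.List.pyGetD shape j 0))
        (1, 1, true, 1)
    -- for j in range(r-1, i-1, -1): ok = ok and strides[j]==expected; expected *= shape[j]; m *= shape[j]
    let st2 : Int × Int × Bool × Int :=
      (PySem.List.pyRange (r - 1) (i - 1) (-1)).foldl
        (fun st j =>
          (st.1, st.2.1 * PySem.List.pyGetD shape j 0,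
           st.2.2.1 && (PySem.List.pyGetD strides j 0 == st.2.2.2),
           st.2.2.2 * PySem.List.pyGetD shape j 0))
        st1
    if st2.2.2.1 then some [st2.1, st2.2.1] else lmadA_loop strides shape r rest

def lmad_is_tr (strides : List Int) (shape : List Int) : Option (List Int) :=
  let r : Int := shape.length
  lmadA_loop strides shape r (PySem.List.pyRange 1 r 1)

-- ===== PORT B =====
-- 'for j in <js>: if strides[j] != strides[j+1]*shape[j+1]: return j' with a default (the break loops)
def lmadB_firstBreak (strides shape : List Int) (js : List Int) (dflt : Int) : Int :=
  match js with
  | [] => dflt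
  | j :: rest =>
    if PySem.List.pyGetD strides j 0 ≠ PySem.List.pyGetD strides (j + 1) 0 * PySem.List.pyGetD shape (j + 1) 0
    then j else lmadB_firstBreak strides shape rest dflt

-- 'for i in range(1, r): pre *= shape[i-1]; if R < i <= L+1 and strides[i-1]==1 and strides[r-1]==pre: …'
def lmadB_loop (strides shape : List Int) (r L R : Int) (pre : Int) : List Int → Option (List Int)
  | [] => none
  | i :: rest =>
    let pre' := pre * PySem.List.pyGetD shape (i - 1) 0
    if R < i ∧ i ≤ L + 1 ∧ PySem.List.pyGetD strides (i - 1) 0 = 1 ∧ PySem.List.pyGetD strides (r - 1) 0 = pre'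
    then some [pre', (PySem.List.pyRange i r 1).foldl (fun m j => m * PySem.List.pyGetD shape j 0) 1]
    else lmadB_loop strides shape r L R pre' rest

def lmad_is_tr_alt (strides : List Int) (shape : List Int) : Option (List Int) :=
  let r : Int := shape.length
  let L := lmadB_firstBreak strides shape (PySem.List.pyRange 0 (r - 1) 1) (r - 1)
  let R := lmadB_firstBreak strides shape (PySem.List.pyRange (r - 2) (-1) (-1)) (-1)
  lmadB_loop strides shape r L R 1 (PySem.List.pyRange 1 r 1)

-- ===== PRECONDITION & SPEC =====
-- Pre_ excludes inputs with fewer strides than dimensions (rank ≥ 2): there A raises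
-- IndexError unless its short-circuiting 'and' happens to fail every candidate before the
-- missing index (then it returns None), while B's break scan always reads strides[j+1]
-- and raises IndexError.
def Pre_lmad_is_tr (strides : List Int) (shape : List Int) : Prop :=
  shape.length ≤ 1 ∨ shape.length ≤ strides.length
instance (strides : List Int) (shape : List Int) : Decidable (Pre_lmad_is_tr strides shape) := by
  unfold Pre_lmad_is_tr; infer_instance

def pvWitness_lmad_is_tr : List Int × List Int := ([1, 2], [2, 3])

def Spec_lmad_is_tr (strides : List Int) (shape : List Int) (out : Option (List Int)) : Prop := out = lmad_is_tr_alt strides shape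
instance (strides : List Int) (shape : List Int) (out : Option (List Int)) : Decidable (Spec_lmad_is_tr strides shape out) := by unfold Spec_lmad_is_tr; infer_instance

-- ===== CLAIM (what is proved, stated in full; the proofs are below) =====
def Claim_equal_lmad_is_tr : Prop := ∀ (strides : List Int) (shape : List Int), Dom_lmad_is_tr strides shape → Pre_lmad_is_tr strides shape → Spec_lmad_is_tr strides shape (lmad_is_tr strides shape)

-- ===== LEMMAS AND PROOFS =====

-- Pprod h a b = product of h[a..b-1]
def Pprod (h : List Int) (a b : Nat) : Int := ((h.take b).drop a).prod

lemma Pprod_self (h : List Int) (a : Nat) : Pprod h a a = 1 := by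
  simp [Pprod, List.drop_eq_nil_of_le, List.length_take]

lemma Pprod_succ_right (h : List Int) (a b : Nat) (hab : a ≤ b) (hb : b < h.length) :
    Pprod h a (b + 1) = Pprod h a b * h.getD b 0 := by
  have hgb : h.getD b 0 = h[b] := List.getD_eq_getElem h 0 hb
  rw [Pprod, Pprod, List.take_add_one, hgb]
  have : h[b]? = some h[b] := List.getElem?_eq_getElem hb
  rw [this]
  rw [List.drop_append_of_le_length (by simp [List.length_take]; omega)]
  simp

lemma Pprod_cons (h : List Int) (a b : Nat) (hab : a < b) (hb : b ≤ h.length) :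
    Pprod h a b = h.getD a 0 * Pprod h (a + 1) b := by
  have ha : a < (h.take b).length := by simp [List.length_take]; omega
  rw [Pprod, List.drop_eq_getElem_cons ha, List.prod_cons]
  have : (h.take b)[a] = h[a]'(by omega) := List.getElem_take
  rw [this, Pprod, List.getD_eq_getElem h 0 (by omega)]

lemma Pprod_drop (h : List Int) (a : Nat) : Pprod h a h.length = (h.drop a).prod := by
  simp [Pprod]

-- first inner loop of A, generalized over the initial state
lemma foldA1 (s h : List Int) (a : Nat) (ha : a ≤ h.length) (n0 m0 : Int) (ok0 : Bool) (e0 : Int) :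
    (PySem.List.pyRange ((a : Int) - 1) (-1) (-1)).foldl
      (fun (st : Int × Int × Bool × Int) j =>
        (st.1 * PySem.List.pyGetD h j 0, st.2.1,
         st.2.2.1 && (PySem.List.pyGetD s j 0 == st.2.2.2),
         st.2.2.2 * PySem.List.pyGetD h j 0))
      (n0, m0, ok0, e0)
    = (n0 * Pprod h 0 a, m0,
       ok0 && decide (∀ j : Nat, j < a → s.getD j 0 = e0 * Pprod h (j + 1) a),
       e0 * Pprod h 0 a) := by
  induction a generalizing n0 m0 ok0 e0 with
  | zero =>
    rw [PySem.List.pyRange_neg_one_eq_nil (by norm_num)]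
    simp [Pprod_self]
  | succ a ih =>
    have hcast : ((a + 1 : Nat) : Int) - 1 = (a : Int) := by push_cast; ring
    rw [hcast, PySem.List.pyRange_neg_one_cons (by omega), List.foldl_cons]
    simp only [PySem.List.pyGetD_natCast]
    rw [ih (by omega)]
    refine Prod.ext ?_ (Prod.ext rfl (Prod.ext ?_ ?_)) <;> simp only
    · rw [Pprod_succ_right h 0 a (by omega) (by omega)]; ring
    · rw [Bool.and_assoc]
      congr 1
      rw [Bool.beq_eq_decide_eq, ← Bool.decide_and]
      apply decide_eq_decide.2
      constructor
      · rintro ⟨h1, h2⟩ j hj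
        rcases Nat.lt_succ_iff_lt_or_eq.1 hj with hj' | hj'
        · rw [h2 j hj', Pprod_succ_right h (j+1) a (by omega) (by omega)]; ring
        · subst hj'; rw [h1, Pprod_self]; ring
      · intro hall
        refine ⟨?_, fun j hj => ?_⟩
        · have := hall a (by omega); rwa [Pprod_self, mul_one] at this
        · have := hall j (by omega)
          rw [Pprod_succ_right h (j+1) a (by omega) (by omega)] at this
          rw [this]; ring
    · rw [Pprod_succ_right h 0 a (by omega) (by omega)]; ring

-- second inner loop of A, generalized over the initial state and the lower bound
lemma foldA2 (s h : List Int) (b a : Nat) (hb : b ≤ a) (ha : a ≤ h.length) (n0 m0 : Int) (ok0 : Bool) (e0 : Int) :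
    (PySem.List.pyRange ((a : Int) - 1) ((b : Int) - 1) (-1)).foldl
      (fun (st : Int × Int × Bool × Int) j =>
        (st.1, st.2.1 * PySem.List.pyGetD h j 0,
         st.2.2.1 && (PySem.List.pyGetD s j 0 == st.2.2.2),
         st.2.2.2 * PySem.List.pyGetD h j 0))
      (n0, m0, ok0, e0)
    = (n0, m0 * Pprod h b a,
       ok0 && decide (∀ j : Nat, b ≤ j → j < a → s.getD j 0 = e0 * Pprod h (j + 1) a),
       e0 * Pprod h b a) := by
  induction a generalizing n0 m0 ok0 e0 with
  | zero =>
    rw [PySem.List.pyRange_neg_one_eq_nil (by omega)]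
    have hb0 : b = 0 := by omega
    subst hb0
    simp [Pprod_self]
  | succ a ih =>
    rcases Nat.eq_or_lt_of_le hb with hba | hba
    · rw [← hba, PySem.List.pyRange_neg_one_eq_nil (by omega)]
      simp [Pprod_self]
      intro _ j h1 h2
      omega
    · have hcast : ((a + 1 : Nat) : Int) - 1 = (a : Int) := by push_cast; ring
      rw [hcast, PySem.List.pyRange_neg_one_cons (by omega), List.foldl_cons]
      simp only [PySem.List.pyGetD_natCast]
      rw [ih (by omega) (by omega)]
      refine Prod.ext rfl (Prod.ext ?_ (Prod.ext ?_ ?_)) <;> simp only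
      · rw [Pprod_succ_right h b a (by omega) (by omega)]; ring
      · rw [Bool.and_assoc]
        congr 1
        rw [Bool.beq_eq_decide_eq, ← Bool.decide_and]
        apply decide_eq_decide.2
        constructor
        · rintro ⟨h1, h2⟩ j hjb hj
          rcases Nat.lt_succ_iff_lt_or_eq.1 hj with hj' | hj'
          · rw [h2 j hjb hj', Pprod_succ_right h (j+1) a (by omega) (by omega)]; ring
          · subst hj'; rw [h1, Pprod_self]; ring
        · intro hall
          refine ⟨?_, fun j hjb hj => ?_⟩
          · have := hall a (by omega) (by omega); rwa [Pprod_self, mul_one] at this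
          · have := hall j hjb (by omega)
            rw [Pprod_succ_right h (j+1) a (by omega) (by omega)] at this
            rw [this]; ring
      · rw [Pprod_succ_right h b a (by omega) (by omega)]; ring

-- the adjacency relation B's break loops test
def relB (s h : List Int) (j : Nat) : Prop :=
  s.getD j 0 = s.getD (j + 1) 0 * h.getD (j + 1) 0

lemma fwdBreak (s h : List Int) (r : Nat) (hr : 1 ≤ r) (d : Nat) :
    ∀ (a : Nat) (L : Int), a + d = r - 1 →
    L = lmadB_firstBreak s h (PySem.List.pyRange (a : Int) ((r : Int) - 1) 1) ((r : Int) - 1) →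
    (a : Int) ≤ L ∧ L ≤ (r : Int) - 1 ∧
    (∀ j : Nat, a ≤ j → (j : Int) < L → relB s h j) ∧
    (L = (r : Int) - 1 ∨ ∃ jn : Nat, (jn : Int) = L ∧ ¬ relB s h jn) := by
  induction d with
  | zero =>
    intro a L hd hL
    have ha : a = r - 1 := by omega
    have hcast : (a : Int) = (r : Int) - 1 := by omega
    rw [hcast, PySem.List.pyRange_one_eq_nil (le_refl _)] at hL
    simp [lmadB_firstBreak] at hL
    refine ⟨by omega, by omega, fun j h1 h2 => absurd h2 (by omega), Or.inl hL⟩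
  | succ d ih =>
    intro a L hd hL
    have hlt : (a : Int) < (r : Int) - 1 := by push_cast; omega
    rw [PySem.List.pyRange_one_cons hlt] at hL
    have hcast1 : (a : Int) + 1 = ((a + 1 : Nat) : Int) := by push_cast; ring
    simp only [lmadB_firstBreak, PySem.List.pyGetD_natCast, hcast1] at hL
    by_cases hb : relB s h a
    · rw [if_neg (by simpa [relB, PySem.List.pyGetD_natCast] using hb)] at hL
      obtain ⟨h1, h2, h3, h4⟩ := ih (a + 1) L (by omega) hL
      refine ⟨by omega, h2, fun j hj hjL => ?_, h4⟩
      rcases Nat.eq_or_lt_of_le hj with hj' | hj'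
      · rwa [← hj']
      · exact h3 j (by omega) hjL
    · rw [if_pos (by simpa [relB, PySem.List.pyGetD_natCast] using hb)] at hL
      refine ⟨by omega, by omega, fun j h1 h2 => absurd h2 (by omega), Or.inr ⟨a, hL.symm, hb⟩⟩

lemma bwdBreak (s h : List Int) :
    ∀ (a : Nat) (R : Int),
    R = lmadB_firstBreak s h (PySem.List.pyRange ((a : Int) - 1) (-1) (-1)) (-1) →
    (-1 : Int) ≤ R ∧ R ≤ (a : Int) - 1 ∧
    (∀ j : Nat, j < a → R < (j : Int) → relB s h j) ∧
    (R = -1 ∨ ∃ jn : Nat, (jn : Int) = R ∧ ¬ relB s h jn) := by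
  intro a
  induction a with
  | zero =>
    intro R hR
    rw [PySem.List.pyRange_neg_one_eq_nil (by norm_num)] at hR
    simp [lmadB_firstBreak] at hR
    refine ⟨by omega, by omega, fun j h1 h2 => absurd h1 (by omega), Or.inl hR⟩
  | succ a ih =>
    intro R hR
    have hcast : ((a + 1 : Nat) : Int) - 1 = (a : Int) := by push_cast; ring
    rw [hcast, PySem.List.pyRange_neg_one_cons (by omega)] at hR
    have hcast1 : (a : Int) + 1 = ((a + 1 : Nat) : Int) := by push_cast; ring
    simp only [lmadB_firstBreak, PySem.List.pyGetD_natCast, hcast1] at hR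
    by_cases hb : relB s h a
    · rw [if_neg (by simpa [relB, PySem.List.pyGetD_natCast] using hb)] at hR
      obtain ⟨h1, h2, h3, h4⟩ := ih R hR
      refine ⟨h1, by omega, fun j hj hjR => ?_, h4⟩
      rcases Nat.lt_succ_iff_lt_or_eq.1 hj with hj' | hj'
      · exact h3 j hj' hjR
      · rwa [hj']
    · rw [if_pos (by simpa [relB, PySem.List.pyGetD_natCast] using hb)] at hR
      refine ⟨by omega, by omega, fun j h1 h2 => absurd h2 (by omega), Or.inr ⟨a, hR.symm, hb⟩⟩

lemma L_le_iff (s h : List Int) (r : Nat) (hr : 2 ≤ r) (i : Nat) (hi : 1 ≤ i) (hir : i < r) :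
    ((i : Int) ≤ lmadB_firstBreak s h (PySem.List.pyRange 0 ((r : Int) - 1) 1) ((r : Int) - 1) + 1
      ↔ ∀ j : Nat, j + 1 < i → relB s h j) := by
  obtain ⟨h1, h2, h3, h4⟩ := fwdBreak s h r (by omega) (r - 1) 0
    (lmadB_firstBreak s h (PySem.List.pyRange 0 ((r : Int) - 1) 1) ((r : Int) - 1)) (by omega) (by norm_num)
  constructor
  · intro hle j hj
    exact h3 j (by omega) (by omega)
  · intro hall
    by_contra hlt
    push_neg at hlt
    rcases h4 with h4 | ⟨jn, hjn, hnr⟩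
    · omega
    · exact hnr (hall jn (by omega))

lemma R_lt_iff (s h : List Int) (r : Nat) (hr : 2 ≤ r) (i : Nat) (hi : 1 ≤ i) (hir : i < r) :
    (lmadB_firstBreak s h (PySem.List.pyRange ((r : Int) - 2) (-1) (-1)) (-1) < (i : Int)
      ↔ ∀ j : Nat, i ≤ j → j + 1 < r → relB s h j) := by
  have hc : (r : Int) - 2 = ((r - 1 : Nat) : Int) - 1 := by omega
  obtain ⟨h1, h2, h3, h4⟩ := bwdBreak s h (r - 1)
    (lmadB_firstBreak s h (PySem.List.pyRange ((r : Int) - 2) (-1) (-1)) (-1)) (by rw [hc])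
  constructor
  · intro hlt j hj1 hj2
    exact h3 j (by omega) (by omega)
  · intro hall
    by_contra hge
    push_neg at hge
    rcases h4 with h4 | ⟨jn, hjn, hnr⟩
    · omega
    · exact hnr (hall jn (by omega) (by omega))

-- A's first-segment check holds iff the anchor strides[i-1]==1 holds and the chain is unbroken below i-1
lemma seg1_iff (s h : List Int) (i : Nat) (hi : 1 ≤ i) (hir : i ≤ h.length) :
    (∀ j : Nat, j < i → s.getD j 0 = Pprod h (j + 1) i)
      ↔ (s.getD (i - 1) 0 = 1 ∧ ∀ j : Nat, j + 1 < i → relB s h j) := by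
  constructor
  · intro hall
    refine ⟨?_, fun j hj => ?_⟩
    · have := hall (i - 1) (by omega)
      rwa [Nat.sub_add_cancel hi, Pprod_self] at this
    · have h1 := hall j (by omega)
      have h2 := hall (j + 1) (by omega)
      rw [relB, h1, h2, Pprod_cons h (j + 1) i (by omega) hir]
      ring
  · rintro ⟨hanchor, hrel⟩
    have key : ∀ (k j : Nat), j < i → i - 1 - j = k → s.getD j 0 = Pprod h (j + 1) i := by
      intro k
      induction k with
      | zero =>
        intro j hj hk
        have : j = i - 1 := by omega
        subst this
        rwa [Nat.sub_add_cancel hi, Pprod_self]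
      | succ k ih =>
        intro j hj hk
        have hrj := hrel j (by omega)
        rw [relB] at hrj
        rw [hrj, ih (j + 1) (by omega) (by omega), Pprod_cons h (j + 1) i (by omega) hir]
        ring
    exact fun j hj => key (i - 1 - j) j hj rfl

-- A's second-segment check holds iff the anchor strides[r-1]==e holds and the chain is unbroken on [i, r-1)
lemma seg2_iff (s h : List Int) (e : Int) (i r : Nat) (hi : i < r) (hr : r ≤ h.length) :
    (∀ j : Nat, i ≤ j → j < r → s.getD j 0 = e * Pprod h (j + 1) r)
      ↔ (s.getD (r - 1) 0 = e ∧ ∀ j : Nat, i ≤ j → j + 1 < r → relB s h j) := by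
  constructor
  · intro hall
    refine ⟨?_, fun j hj1 hj2 => ?_⟩
    · have := hall (r - 1) (by omega) (by omega)
      rwa [Nat.sub_add_cancel (by omega), Pprod_self, mul_one] at this
    · have h1 := hall j hj1 (by omega)
      have h2 := hall (j + 1) (by omega) (by omega)
      rw [relB, h1, h2, Pprod_cons h (j + 1) r (by omega) hr]
      ring
  · rintro ⟨hanchor, hrel⟩
    have key : ∀ (k j : Nat), i ≤ j → j < r → r - 1 - j = k → s.getD j 0 = e * Pprod h (j + 1) r := by
      intro k
      induction k with
      | zero =>
        intro j hj1 hj2 hk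
        have : j = r - 1 := by omega
        subst this
        rw [Nat.sub_add_cancel (by omega), Pprod_self, mul_one]
        exact hanchor
      | succ k ih =>
        intro j hj1 hj2 hk
        have hrj := hrel j hj1 (by omega)
        rw [relB] at hrj
        rw [hrj, ih (j + 1) (by omega) (by omega) (by omega), Pprod_cons h (j + 1) r (by omega) hr]
        ring
    exact fun j hj1 hj2 => key (r - 1 - j) j hj1 hj2 rfl

-- the two candidate loops agree, index by index
lemma loops_eq (s h : List Int) (hs : h.length ≤ s.length) (hr2 : 2 ≤ h.length) (d : Nat) :
    ∀ (a : Nat), 1 ≤ a → a + d = h.length →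
    lmadA_loop s h (h.length : Int) (PySem.List.pyRange (a : Int) (h.length : Int) 1)
      = lmadB_loop s h (h.length : Int)
          (lmadB_firstBreak s h (PySem.List.pyRange 0 ((h.length : Int) - 1) 1) ((h.length : Int) - 1))
          (lmadB_firstBreak s h (PySem.List.pyRange ((h.length : Int) - 2) (-1) (-1)) (-1))
          (Pprod h 0 (a - 1)) (PySem.List.pyRange (a : Int) (h.length : Int) 1) := by
  induction d with
  | zero =>
    intro a ha1 hd
    rw [PySem.List.pyRange_one_eq_nil (by omega)]
    rfl
  | succ d ih =>
    intro a ha1 hd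
    rw [PySem.List.pyRange_one_cons (by omega : (a : Int) < (h.length : Int))]
    -- unfold one step of A
    rw [lmadA_loop, lmadB_loop]
    rw [foldA1 s h a (by omega)]
    rw [foldA2 s h a h.length (by omega) (le_refl _)]
    -- normalize B's index casts
    have hc1 : (a : Int) - 1 = ((a - 1 : Nat) : Int) := by omega
    have hc2 : (h.length : Int) - 1 = ((h.length - 1 : Nat) : Int) := by omega
    simp only [hc1, hc2, PySem.List.pyGetD_natCast]
    have hpre : Pprod h 0 (a - 1) * h.getD (a - 1) 0 = Pprod h 0 a := by
      have : a - 1 + 1 = a := by omega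
      rw [← Pprod_succ_right h 0 (a - 1) (by omega) (by omega), this]
    -- the two branch conditions are equivalent
    have hcond :
        ((true && decide (∀ j : Nat, j < a → s.getD j 0 = 1 * Pprod h (j + 1) a)) &&
          decide (∀ j : Nat, a ≤ j → j < h.length → s.getD j 0 = 1 * Pprod h 0 a * Pprod h (j + 1) h.length)) = true
        ↔ (lmadB_firstBreak s h (PySem.List.pyRange ((h.length : Int) - 2) (-1) (-1)) (-1) < (a : Int) ∧
           (a : Int) ≤ lmadB_firstBreak s h (PySem.List.pyRange 0 ((h.length - 1 : Nat) : Int) 1) ((h.length - 1 : Nat) : Int) + 1 ∧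
           s.getD (a - 1) 0 = 1 ∧
           s.getD (h.length - 1) 0 = Pprod h 0 (a - 1) * h.getD (a - 1) 0) := by
      rw [← hc2]
      simp only [true_and, Bool.and_eq_true, decide_eq_true_eq, one_mul, hpre]
      rw [seg1_iff s h a ha1 (by omega),
          seg2_iff s h (Pprod h 0 a) a h.length (by omega) (le_refl _),
          R_lt_iff s h h.length hr2 a ha1 (by omega),
          L_le_iff s h h.length hr2 a ha1 (by omega)]
      tauto
    by_cases hok : (lmadB_firstBreak s h (PySem.List.pyRange ((h.length : Int) - 2) (-1) (-1)) (-1) < (a : Int) ∧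
           (a : Int) ≤ lmadB_firstBreak s h (PySem.List.pyRange 0 ((h.length - 1 : Nat) : Int) 1) ((h.length - 1 : Nat) : Int) + 1 ∧
           s.getD (a - 1) 0 = 1 ∧
           s.getD (h.length - 1) 0 = Pprod h 0 (a - 1) * h.getD (a - 1) 0)
    · rw [if_pos (hcond.2 hok), if_pos hok]
      have hfold : (PySem.List.pyRange (a : Int) ((h.length : Int)) 1).foldl
          (fun m j => m * PySem.List.pyGetD h j 0) 1 = Pprod h a h.length := by
        rw [PySem.List.foldl_pyRange_pyGetD' h 0 (fun m j => m * j) 1 (by positivity)]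
        rw [Pprod_drop, Int.toNat_natCast, List.prod_eq_foldl]
      rw [hfold, hpre]
      simp
    · rw [if_neg (fun hc => hok (hcond.1 hc)), if_neg hok]
      have hcast : (a : Int) + 1 = ((a + 1 : Nat) : Int) := by push_cast; ring
      rw [hcast, hpre]
      have := ih (a + 1) (by omega) (by omega)
      rw [hc2] at this
      exact this

-- ===== VERDICT (by name: the statement is the Claim_ definition above) =====
theorem lmad_is_tr_spec : Claim_equal_lmad_is_tr := by
  intro s h hdom hpre
  unfold Spec_lmad_is_tr lmad_is_tr lmad_is_tr_alt
  dsimp only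
  by_cases hr : h.length ≤ 1
  · rw [PySem.List.pyRange_one_eq_nil (by omega)]
    rfl
  · have hs : h.length ≤ s.length := by
      rcases hpre with hp | hp
      · omega
      · exact hp
    have h1 : ((1 : Nat) : Int) = (1 : Int) := by norm_num
    have := loops_eq s h hs (by omega) (h.length - 1) 1 (le_refl _) (by omega)
    rw [h1] at this
    simpa using this
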